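-- pv_equiv track=rewrite | github.com/lizaigaoge550/multi-table | read_data_2.py | generate_multi_tags
-- ===== SOURCE A (Python) =====
-- import copy
--
-- def generate_index(inital,s,count):
--     if count == 0:
--         s.append(copy.copy(inital))
--         return
--     for i in range(2):
--         inital.append(i)
--         generate_index(inital,s,count-1)
--         del inital[-1]
--
-- def no_pat(tag,index):
--     s = []
--     for i in range(len(tag[index])):
--         if tag[index][i] != 'pat':
--             s.append(tag[index][i])
--     return s
--
-- def generate_multi_tags(tags):
--     #tag中可能有pat所以要拆分
--     #获取pat的索引
--     pat_index = []
--     index_count = 0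
--     for tag_index in range(len(tags)):
--         if 'pat' in tags[tag_index]:
--             pat_index.append(tag_index)
--             index_count += 1
--     if index_count == 0:
--         return [tags]
--     #产生索引
--     s = []
--     generate_index([],s,index_count)
--     data = []
--
--     for s_index in range(len(s)):
--         tag_copy = copy.copy(tags)
--         for index,value in zip(pat_index,s[s_index]):
--             if value == 0:
--                 tag_copy[index] = []
--             else:
--                 tag_copy[index] = no_pat(tag_copy,index)
--         tag_copy = list(filter(lambda a:a!=[],tag_copy))
--         data.append(copy.deepcopy(tag_copy))
--     return data
-- ===== SOURCE B (Python) =====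
-- import copy
--
-- def generate_multi_tags(tags):
--     # iterative doubling over the pat positions instead of a recursive index table
--     pat = [(i, [t for t in tags[i] if t != 'pat'])
--            for i in range(len(tags)) if 'pat' in tags[i]]
--     if not pat:
--         return [tags]
--     results = [list(tags)]
--     for i, stripped in pat:
--         nxt = []
--         for cur in results:
--             c0 = list(cur)
--             c0[i] = []
--             nxt.append(c0)
--             c1 = list(cur)
--             c1[i] = stripped
--             nxt.append(c1)
--         results = nxt
--     return [copy.deepcopy([row for row in cur if row != []]) for cur in results]
-- ===== Notes on version B (the rewrite author's own statement) =====
-- stated objective: simpler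
-- what changed: Replaced the recursive 0/1 index-table generator (generate_index) and the per-index-tuple rebuild by a single iterative doubling pass: per pat position the stripped row is precomputed once and each partial copy is split into its bit-0 and bit-1 children in order, then the empty rows are filtered at the end.
import Mathlib
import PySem

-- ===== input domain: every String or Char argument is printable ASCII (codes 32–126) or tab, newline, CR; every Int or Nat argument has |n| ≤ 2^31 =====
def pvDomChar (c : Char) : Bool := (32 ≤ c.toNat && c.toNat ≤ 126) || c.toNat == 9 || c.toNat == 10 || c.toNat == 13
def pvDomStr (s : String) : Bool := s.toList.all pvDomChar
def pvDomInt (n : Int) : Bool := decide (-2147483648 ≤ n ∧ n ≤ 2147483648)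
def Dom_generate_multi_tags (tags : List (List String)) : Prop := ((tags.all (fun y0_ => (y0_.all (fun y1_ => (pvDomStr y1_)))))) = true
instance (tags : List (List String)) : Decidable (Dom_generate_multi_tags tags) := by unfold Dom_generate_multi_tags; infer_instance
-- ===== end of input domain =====

-- B replaces A's recursive 0/1-index table (generate_index) by iterative doubling of partial copies
-- over the pat positions; objective: simpler (no recursion, no index table), same result.
-- A mutates nothing observable; equivalence is about the return value.

-- ===== PORT A =====
-- 'for i in range(2): inital.append(i); recurse; del inital[-1]' threaded through s
def generate_index (inital : List Int) (s : List (List Int)) : Nat → List (List Int)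
  | 0 => s ++ [inital]
  | n + 1 => generate_index (inital ++ [1]) (generate_index (inital ++ [0]) s n) n

-- indices produced by 'range(len(...))' are always in range and nonnegative, so Nat indexing
-- with List.getD is exact here
def no_pat (tag : List (List String)) (index : Nat) : List String :=
  (List.range (tag.getD index []).length).foldl
    (fun s i => if (tag.getD index []).getD i "" ≠ "pat" then s ++ [(tag.getD index []).getD i ""] else s) []

def generate_multi_tags (tags : List (List String)) : List (List (List String)) :=
  let pat_index : List Nat :=
    (List.range tags.length).foldl
      (fun acc tag_index => if "pat" ∈ tags.getD tag_index [] then acc ++ [tag_index] else acc) []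
  let index_count := pat_index.length
  if index_count = 0 then [tags]
  else
    let s := generate_index [] [] index_count
    (List.range s.length).foldl
      (fun data s_index =>
        let tag_copy := (pat_index.zip (s.getD s_index [])).foldl
          (fun tc iv => if iv.2 = 0 then tc.set iv.1 [] else tc.set iv.1 (no_pat tc iv.1)) tags
        data ++ [tag_copy.filter (fun a => a ≠ [])]) []

-- ===== PORT B =====
def generate_multi_tags_alt (tags : List (List String)) : List (List (List String)) :=
  let pat : List (Nat × List String) :=
    ((List.range tags.length).filter (fun i => "pat" ∈ tags.getD i [])).map
      (fun i => (i, (tags.getD i []).filter (fun t => t ≠ "pat")))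
  if pat = [] then [tags]
  else
    let results := pat.foldl
      (fun rs p => rs.foldl (fun nxt cur => nxt ++ [cur.set p.1 [], cur.set p.1 p.2]) []) [tags]
    results.map (fun cur => cur.filter (fun row => row ≠ []))

-- ===== PRECONDITION & SPEC =====
def Spec_generate_multi_tags (tags : List (List String)) (out : List (List (List String))) : Prop := out = generate_multi_tags_alt tags
instance (tags : List (List String)) (out : List (List (List String))) : Decidable (Spec_generate_multi_tags tags out) := by unfold Spec_generate_multi_tags; infer_instance

-- ===== CLAIM (what is proved, stated in full; the proofs are below) =====
def Claim_equal_generate_multi_tags : Prop := ∀ (tags : List (List String)), Dom_generate_multi_tags tags → Spec_generate_multi_tags tags (generate_multi_tags tags)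

-- ===== LEMMAS AND PROOFS =====

-- a fold over 'range(len(l))' that only reads l[i] is a structural fold over l
theorem foldl_range_getD {α β : Type} (l : List α) (g : β → α → β) (a : β) (d : α) :
    (List.range l.length).foldl (fun acc i => g acc (l.getD i d)) a = l.foldl g a := by
  rw [← List.foldl_map]
  congr 1
  apply List.ext_getElem (by simp)
  intro i h1 h2
  simp [List.getD_eq_getElem?_getD, h2]

theorem no_pat_eq (tag : List (List String)) (index : Nat) :
    no_pat tag index = (tag.getD index []).filter (fun x => x ≠ "pat") := by
  unfold no_pat
  rw [foldl_range_getD (g := fun s x => if x ≠ "pat" then s ++ [x] else s)]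
  simpa using PySem.List.foldl_append_ite_eq_filter (fun x => x ≠ "pat") (tag.getD index []) []

-- the 0/1 index table, structurally
def blists : Nat → List (List Int)
  | 0 => [[]]
  | n + 1 => (blists n).map (fun b => 0 :: b) ++ (blists n).map (fun b => 1 :: b)

theorem generate_index_eq : ∀ (n : Nat) (inital : List Int) (s : List (List Int)),
    generate_index inital s n = s ++ (blists n).map (fun b => inital ++ b) := by
  intro n
  induction n with
  | zero => intro inital s; simp [generate_index, blists]
  | succ n ih =>
      intro inital s
      simp [generate_index, ih, blists, List.map_map, Function.comp_def, List.append_assoc]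

-- B's per-position doubling step
def dblStep (p : Nat × List String) (rs : List (List (List String))) : List (List (List String)) :=
  rs.foldl (fun nxt cur => nxt ++ [cur.set p.1 [], cur.set p.1 p.2]) []

theorem dblStep_eq (p : Nat × List String) (rs : List (List (List String))) :
    dblStep p rs = rs.flatMap (fun cur => [cur.set p.1 [], cur.set p.1 p.2]) := by
  unfold dblStep
  simpa using PySem.List.foldl_append_eq_flatMap (fun cur => [cur.set p.1 [], cur.set p.1 p.2]) rs []

def dbl (pat : List (Nat × List String)) (R : List (List (List String))) : List (List (List String)) :=
  pat.foldl (fun rs p => dblStep p rs) R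

theorem dbl_append : ∀ (pat : List (Nat × List String)) (R1 R2 : List (List (List String))),
    dbl pat (R1 ++ R2) = dbl pat R1 ++ dbl pat R2 := by
  intro pat
  induction pat with
  | nil => intro R1 R2; simp [dbl]
  | cons p pat ih =>
      intro R1 R2
      simp only [dbl, List.foldl_cons]
      rw [show dblStep p (R1 ++ R2) = dblStep p R1 ++ dblStep p R2 by
        simp [dblStep_eq, List.flatMap_append]]
      exact ih _ _

-- B's precomputed-strip application along a bit string
def applyB (t : List (List String)) (pairs : List ((Nat × List String) × Int)) : List (List String) :=
  pairs.foldl (fun tc pb => if pb.2 = 0 then tc.set pb.1.1 [] else tc.set pb.1.1 pb.1.2) t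

theorem dbl_single : ∀ (pat : List (Nat × List String)) (t : List (List String)),
    dbl pat [t] = (blists pat.length).map (fun bits => applyB t (pat.zip bits)) := by
  intro pat
  induction pat with
  | nil => intro t; simp [dbl, blists, applyB]
  | cons p pat ih =>
      intro t
      have h1 : dbl (p :: pat) [t] = dbl pat [t.set p.1 []] ++ dbl pat [t.set p.1 p.2] := by
        simp only [dbl, List.foldl_cons]
        rw [show dblStep p [t] = [t.set p.1 []] ++ [t.set p.1 p.2] by simp [dblStep_eq]]
        exact dbl_append pat _ _
      rw [h1, ih, ih]
      simp [blists, List.map_map, Function.comp_def, applyB, List.zip_cons_cons]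

-- A's in-place application along a bit string
def applyA (pairs : List (Nat × Int)) (t : List (List String)) : List (List String) :=
  pairs.foldl (fun tc iv => if iv.2 = 0 then tc.set iv.1 [] else tc.set iv.1 (no_pat tc iv.1)) t

theorem apply_eq : ∀ (pat : List (Nat × List String)) (bits : List Int) (t : List (List String)),
    pat.Pairwise (fun p q => p.1 ≠ q.1) →
    (∀ p ∈ pat, p.2 = (t.getD p.1 []).filter (fun x => x ≠ "pat")) →
    applyA ((pat.map Prod.fst).zip bits) t = applyB t (pat.zip bits) := by
  intro pat
  induction pat with
  | nil => intro bits t _ _; simp [applyA, applyB]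
  | cons p pat ih =>
      intro bits t hpw hsnd
      cases bits with
      | nil => simp [applyA, applyB]
      | cons b bits =>
          have hp2 : p.2 = (t.getD p.1 []).filter (fun x => x ≠ "pat") := hsnd p (by simp)
          simp only [List.map_cons, List.zip_cons_cons, applyA, applyB, List.foldl_cons]
          rw [no_pat_eq, ← hp2]
          refine ih bits _ (List.pairwise_cons.mp hpw).2 ?_
          intro q hq
          have hne : p.1 ≠ q.1 := (List.pairwise_cons.mp hpw).1 q hq
          rw [hsnd q (List.mem_cons_of_mem p hq)]
          by_cases hb : b = 0 <;>
            simp [hb, List.getD_eq_getElem?_getD, List.getElem?_set_ne hne]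

-- ===== VERDICT (by name: the statement is the Claim_ definition above) =====
theorem generate_multi_tags_spec : Claim_equal_generate_multi_tags := by
  intro tags _
  unfold Spec_generate_multi_tags generate_multi_tags generate_multi_tags_alt
  simp only []
  rw [show (List.range tags.length).foldl
        (fun acc tag_index => if "pat" ∈ tags.getD tag_index [] then acc ++ [tag_index] else acc) [] =
      (List.range tags.length).filter (fun i => "pat" ∈ tags.getD i []) by
    simpa using PySem.List.foldl_append_ite_eq_filter
      (fun i => "pat" ∈ tags.getD i []) (List.range tags.length) []]
  set flt := (List.range tags.length).filter (fun i => "pat" ∈ tags.getD i []) with hflt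
  by_cases hf : flt = []
  · simp [hf]
  · have hlen : ¬ flt.length = 0 := by simpa [List.length_eq_zero_iff] using hf
    have hmapne : ¬ flt.map (fun i => (i, (tags.getD i []).filter (fun t => t ≠ "pat"))) = [] := by
      simpa using hf
    rw [if_neg hlen, if_neg hmapne]
    set pat := flt.map (fun i => (i, (tags.getD i []).filter (fun t => t ≠ "pat"))) with hpat
    -- A side: index table = blists, main loop = map
    rw [generate_index_eq]
    simp only [List.nil_append]
    simp only [List.map_id']
    rw [foldl_range_getD (l := blists flt.length)
      (g := fun data bits =>
        data ++ [((flt.zip bits).foldl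
            (fun tc iv => if iv.2 = 0 then tc.set iv.1 [] else tc.set iv.1 (no_pat tc iv.1))
            tags).filter (fun a => a ≠ [])]) (a := []) (d := [])]
    rw [PySem.List.foldl_append_singleton_eq_map
      (fun bits => ((flt.zip bits).foldl
          (fun tc iv => if iv.2 = 0 then tc.set iv.1 [] else tc.set iv.1 (no_pat tc iv.1))
          tags).filter (fun a => a ≠ [])) (blists flt.length) []]
    -- B side: doubling = blists-indexed map
    rw [show pat.foldl
          (fun rs p => rs.foldl (fun nxt cur => nxt ++ [cur.set p.1 [], cur.set p.1 p.2]) []) [tags] =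
        dbl pat [tags] by rfl]
    rw [dbl_single, List.map_map]
    have hlen2 : pat.length = flt.length := by simp [hpat]
    rw [hlen2]
    simp only [List.nil_append]
    refine List.map_congr_left ?_
    intro bits _
    have hfst : pat.map Prod.fst = flt := by simp [hpat, Function.comp_def]
    have hA : applyA (flt.zip bits) tags = applyB tags (pat.zip bits) := by
      rw [← hfst]
      apply apply_eq
      · rw [hpat, List.pairwise_map]
        have : flt.Pairwise (· ≠ ·) := (List.nodup_range.filter _)
        exact this.imp (fun h => h)
      · intro q hq
        rw [hpat] at hq
        rcases List.mem_map.mp hq with ⟨i, _, rfl⟩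
        rfl
    exact congrArg (List.filter (fun a => a ≠ [])) hA
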